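-- pv_equiv track=rewrite | github.com/efrenmartinez/algoritms_python_platzi | ejercicio_22.py | adjacentElementsProduct
-- ===== SOURCE A (Python) =====
-- def adjacentElementsProduct(inputArray):
--     numero_anterior = 0
--     resultado_mayor = 0
--     contador = 0
--     for i in inputArray:
--         numero_actual = i
--         if (contador == 0):
--             numero_anterior = i
--         else:
--             multiplicacion = numero_anterior * numero_actual
--             if ( multiplicacion > resultado_mayor ):
--                 resultado_mayor = multiplicacion
--             numero_anterior = i
--         contador+=1
--
--     return resultado_mayor
-- ===== SOURCE B (Python) =====
-- def adjacentElementsProduct(inputArray):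
--     # Divide and conquer on the index range: the max adjacent product of a range
--     # is the max of the two halves' answers and the product of the pair straddling
--     # the split point; ranges with fewer than 2 elements contribute the 0 baseline.
--     def best(lo, hi):
--         if hi - lo < 2:
--             return 0
--         mid = (lo + hi) // 2
--         cross = inputArray[mid - 1] * inputArray[mid]
--         return max(best(lo, mid), best(mid, hi), cross)
--     return best(0, len(inputArray))
-- ===== Notes on version B (the rewrite author's own statement) =====
-- stated objective: alternative
-- what changed: Replaced A's stateful left-to-right loop (counter + previous-element tracking) by a divide-and-conquer recursion on index ranges: each range's answer is the max of the two halves' answers and the product of the pair straddling the midpoint, with 0 as the base case for ranges shorter than 2.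
import Mathlib
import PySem

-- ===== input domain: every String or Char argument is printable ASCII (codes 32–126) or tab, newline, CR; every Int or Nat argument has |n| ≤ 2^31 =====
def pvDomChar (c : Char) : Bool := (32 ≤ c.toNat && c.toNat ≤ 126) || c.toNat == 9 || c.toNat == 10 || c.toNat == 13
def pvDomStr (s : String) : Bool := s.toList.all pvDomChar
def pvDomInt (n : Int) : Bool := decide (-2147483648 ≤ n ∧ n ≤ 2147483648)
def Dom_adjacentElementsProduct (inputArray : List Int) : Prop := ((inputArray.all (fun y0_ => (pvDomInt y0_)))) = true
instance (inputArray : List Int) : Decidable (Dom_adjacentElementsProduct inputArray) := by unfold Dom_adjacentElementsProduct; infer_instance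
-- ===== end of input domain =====

-- B replaces A's stateful left-to-right loop by a divide-and-conquer on index ranges
-- (halves' maxima combined with the straddling pair's product); objective: alternative.

-- ===== PORT A =====
-- state: (numero_anterior, resultado_mayor, contador)
def adjacentElementsProduct (inputArray : List Int) : Int :=
  (inputArray.foldl
    (fun (st : Int × Int × Int) i =>
      let prev := st.1; let res := st.2.1; let cnt := st.2.2
      if cnt == 0 then (i, res, cnt + 1)
      else
        let m := prev * i
        (i, if m > res then m else res, cnt + 1))
    (0, 0, 0)).2.1

-- ===== PORT B =====
-- Source B's inner best(lo, hi).  lo, hi stay nonnegative throughout, so Nat `/ 2`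
-- is exactly Python's `// 2`; the indices mid-1, mid are always in range, so
-- pyGet? never returns none and the `.getD 0` default is never used.
def pvBest (arr : List Int) (lo hi : Nat) : Int :=
  if h : hi - lo < 2 then 0
  else
    let mid := (lo + hi) / 2
    let cross := ((PySem.List.pyGet? arr ((mid : Int) - 1)).getD 0) *
                 ((PySem.List.pyGet? arr (mid : Int)).getD 0)
    max (max (pvBest arr lo mid) (pvBest arr mid hi)) cross
termination_by hi - lo
decreasing_by all_goals omega

def adjacentElementsProduct_alt (inputArray : List Int) : Int :=
  pvBest inputArray 0 inputArray.length

-- ===== PRECONDITION & SPEC =====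
def Spec_adjacentElementsProduct (inputArray : List Int) (out : Int) : Prop := out = adjacentElementsProduct_alt inputArray
instance (inputArray : List Int) (out : Int) : Decidable (Spec_adjacentElementsProduct inputArray out) := by unfold Spec_adjacentElementsProduct; infer_instance

-- ===== CLAIM (what is proved, stated in full; the proofs are below) =====
def Claim_equal_adjacentElementsProduct : Prop := ∀ (inputArray : List Int), Dom_adjacentElementsProduct inputArray → Spec_adjacentElementsProduct inputArray (adjacentElementsProduct inputArray)

-- ===== LEMMAS AND PROOFS =====

-- common characterisation: max, floored at 0, of the products arr[i]*arr[i+1]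
def pvG (arr : List Int) (i : Nat) : Int := arr.getD i 0 * arr.getD (i + 1) 0
def pvFmax (l : List Int) : Int := l.foldl max 0

theorem pv_foldl_max_shift (l : List Int) : ∀ a b : Int,
    l.foldl max (max a b) = max a (l.foldl max b) := by
  induction l with
  | nil => intro a b; rfl
  | cons x t ih =>
    intro a b
    simp only [List.foldl_cons, max_assoc]
    exact ih a (max b x)

theorem pv_le_foldl_max (l : List Int) : ∀ a : Int, a ≤ l.foldl max a := by
  induction l with
  | nil => intro a; simp
  | cons x t ih =>
    intro a
    simp only [List.foldl_cons]
    exact le_trans (le_max_left a x) (ih _)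

theorem pvFmax_append (l1 l2 : List Int) :
    pvFmax (l1 ++ l2) = max (pvFmax l1) (pvFmax l2) := by
  unfold pvFmax
  rw [List.foldl_append]
  have h0 : (0 : Int) ≤ l1.foldl max 0 := pv_le_foldl_max l1 0
  have h := pv_foldl_max_shift l2 (l1.foldl max 0) 0
  rw [max_eq_left h0] at h
  exact h

-- divide and conquer equals the indexed max: pvBest arr lo hi is the max (floored
-- at 0) of pvG arr i over i ∈ [lo, hi-2]
theorem pvBest_eq (arr : List Int) : ∀ (n lo hi : Nat), hi - lo ≤ n →
    pvBest arr lo hi = pvFmax ((List.range' lo (hi - lo - 1)).map (pvG arr)) := by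
  intro n
  induction n with
  | zero =>
    intro lo hi h
    rw [pvBest]
    have : hi - lo < 2 := by omega
    simp only [this, dite_true]
    have : hi - lo - 1 = 0 := by omega
    simp [this, pvFmax]
  | succ k ih =>
    intro lo hi h
    rw [pvBest]
    by_cases hs : hi - lo < 2
    · simp only [hs, dite_true]
      have : hi - lo - 1 = 0 := by omega
      simp [this, pvFmax]
    · simp only [hs, dite_false]
      set mid := (lo + hi) / 2 with hmid
      have hlo : lo + 1 ≤ mid := by omega
      have hhi : mid + 1 ≤ hi := by omega
      -- split the index range at mid-1
      have hsplit : List.range' lo (hi - lo - 1)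
          = List.range' lo (mid - lo - 1) ++ [mid - 1] ++ List.range' mid (hi - mid - 1) := by
        have h1 : List.range' lo (mid - lo - 1) ++ List.range' (lo + 1 * (mid - lo - 1)) 1
            = List.range' lo (mid - lo - 1 + 1) := List.range'_append ..
        have h2 : List.range' lo (mid - lo) ++ List.range' (lo + 1 * (mid - lo)) (hi - mid - 1)
            = List.range' lo (mid - lo + (hi - mid - 1)) := List.range'_append ..
        simp only [one_mul] at h1 h2
        have e1 : lo + (mid - lo - 1) = mid - 1 := by omega
        have e2 : lo + (mid - lo) = mid := by omega
        have e3 : mid - lo - 1 + 1 = mid - lo := by omega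
        have e4 : mid - lo + (hi - mid - 1) = hi - lo - 1 := by omega
        rw [e1, e3] at h1
        rw [e2, e4] at h2
        rw [← h2, ← h1]
        simp [List.range']
      rw [hsplit]
      have hcross : ((PySem.List.pyGet? arr ((mid : Int) - 1)).getD 0) *
          ((PySem.List.pyGet? arr (mid : Int)).getD 0) = pvG arr (mid - 1) := by
        have hc1 : ((mid : Int) - 1) = ((mid - 1 : Nat) : Int) := by omega
        rw [hc1, PySem.List.pyGet?_natCast, PySem.List.pyGet?_natCast]
        have hc2 : mid - 1 + 1 = mid := by omega
        simp [pvG, hc2, List.getD]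
      rw [hcross, List.map_append, List.map_append, pvFmax_append, pvFmax_append,
        ih lo mid (by omega), ih mid hi (by omega)]
      simp only [List.map_cons, List.map_nil]
      have hsingle : pvFmax [pvG arr (mid - 1)] = max 0 (pvG arr (mid - 1)) := by
        simp [pvFmax]
      rw [hsingle]
      -- both sides are maxima of the same three quantities and 0; the two
      -- recursive results are ≥ 0, so the extra 0 is absorbed
      have hA : (0:Int) ≤ pvFmax ((List.range' lo (mid - lo - 1)).map (pvG arr)) :=
        pv_le_foldl_max _ 0
      generalize pvFmax ((List.range' lo (mid - lo - 1)).map (pvG arr)) = A at *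
      generalize pvFmax ((List.range' mid (hi - mid - 1)).map (pvG arr)) = B
      generalize pvG arr (mid - 1) = C
      rcases le_total A B with h1 | h1 <;> rcases le_total A C with h2 | h2 <;>
        rcases le_total B C with h3 | h3 <;>
        simp [max_def] <;> omega

-- A's loop after the first element computes the running max over the adjacent
-- products of prev :: xs, seeded at res
theorem adjacentElementsProduct_loop (xs : List Int) :
    ∀ (prev res cnt : Int), 1 ≤ cnt →
      (xs.foldl
        (fun (st : Int × Int × Int) i =>
          if st.2.2 == 0 then (i, st.2.1, st.2.2 + 1)
          else (i, if st.1 * i > st.2.1 then st.1 * i else st.2.1, st.2.2 + 1))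
        (prev, res, cnt)).2.1
      = (((prev :: xs).zip xs).map (fun p => p.1 * p.2)).foldl max res := by
  induction xs with
  | nil => intro prev res cnt _; simp
  | cons y ys ih =>
    intro prev res cnt hc
    have hne : (cnt == 0) = false := by
      simp only [beq_eq_false_iff_ne]; omega
    simp only [List.foldl_cons, hne, List.zip_cons_cons, List.map_cons,
      Bool.false_eq_true, if_false]
    rw [ih y (if prev * y > res then prev * y else res) (cnt + 1) (by omega)]
    congr 1
    rcases lt_or_ge res (prev * y) with h | h
    · simp [h, max_eq_right (le_of_lt h)]
    · simp [not_lt.mpr h, max_eq_left h]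

-- the zip-with-tail products are the indexed products pvG l i, i ∈ [0, len-2]
theorem pv_zipmap_eq (l : List Int) :
    ((l.zip l.tail).map (fun p => p.1 * p.2))
      = (List.range' 0 (l.length - 1)).map (pvG l) := by
  apply List.ext_getElem
  · simp [List.length_zip, List.length_tail]
  · intro i h1 h2
    have hlen : i + 1 < l.length := by
      simp [List.length_zip, List.length_tail] at h1; omega
    simp only [List.getElem_map, List.getElem_zip, List.getElem_tail,
      List.getElem_range', pvG, List.getD]
    simp only [Nat.zero_add, Nat.one_mul]
    rw [List.getElem?_eq_getElem (show i < l.length by omega),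
      List.getElem?_eq_getElem hlen]
    simp

-- ===== VERDICT (by name: the statement is the Claim_ definition above) =====
theorem adjacentElementsProduct_spec : Claim_equal_adjacentElementsProduct := by
  intro xs _
  unfold Spec_adjacentElementsProduct adjacentElementsProduct adjacentElementsProduct_alt
  cases xs with
  | nil => rw [pvBest]; simp
  | cons x t =>
    simp only [List.foldl_cons]
    have h0 : ((0 : Int) == 0) = true := by decide
    simp only [h0, if_true]
    have hl := adjacentElementsProduct_loop t x 0 1 (by omega)
    simp only [show (0 : Int) + 1 = 1 from rfl]
    rw [hl, pvBest_eq (x :: t) (x :: t).length 0 (x :: t).length (by omega)]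
    have := pv_zipmap_eq (x :: t)
    simp only [List.tail_cons] at this
    rw [this]
    rfl
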